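-- pv_equiv track=rewrite | github.com/akih1r/AtCoder-solutions | abc/ab454_d.py | f
-- ===== SOURCE A (Python) =====
-- def f(S):
--     stack = []
--     for i in range(len(S)):
--         stack.append(S[i])
--         if len(stack) >= 4 and stack[-1] == ")" and stack[-2] == "x" and stack[-3] == "x" and stack[-4] == "(":
--             s1 = stack.pop()
--             s2 = stack.pop()
--             s3 = stack.pop()
--             s4 = stack.pop()
--             stack.append(s2)
--             stack.append(s3)
--     return stack
-- ===== SOURCE B (Python) =====
-- def f(S):
--     while "(xx)" in S:
--         S = S.replace("(xx)", "xx")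
--     return list(S)
-- ===== Notes on version B (the rewrite author's own statement) =====
-- stated objective: simpler
-- what changed: A maintains an explicit stack and cancels '(xx)' as each ')' arrives; B instead iterates the global rewrite S = S.replace('(xx)','xx') to a fixed point (the rule's left-hand sides cannot overlap, so any reduction order reaches the same normal form) and returns list(S).
import Mathlib
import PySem

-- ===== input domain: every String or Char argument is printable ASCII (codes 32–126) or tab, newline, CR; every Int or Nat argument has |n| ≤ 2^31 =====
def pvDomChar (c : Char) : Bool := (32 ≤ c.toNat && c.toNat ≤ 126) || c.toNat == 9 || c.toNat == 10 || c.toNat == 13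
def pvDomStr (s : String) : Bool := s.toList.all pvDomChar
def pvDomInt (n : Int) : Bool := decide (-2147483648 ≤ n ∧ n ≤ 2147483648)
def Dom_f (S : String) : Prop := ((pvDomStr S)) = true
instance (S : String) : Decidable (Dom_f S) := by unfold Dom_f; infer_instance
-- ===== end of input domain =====

-- B replaces A's explicit stack machine by iterating the rewrite rule '(xx)' -> 'xx' to a fixed
-- point with str.replace (objective: alternative/simpler code, not faster); same return value.

-- ===== PORT A =====
-- one iteration of A's loop body: push the character, then pop four and push back "x","x"
-- if the top four of the stack are "(", "x", "x", ")"
def fStep (stack : List String) (c : String) : List String :=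
  let st := stack ++ [c]
  if st.length ≥ 4 ∧ PySem.List.pyGet? st (-1) = some ")" ∧ PySem.List.pyGet? st (-2) = some "x"
      ∧ PySem.List.pyGet? st (-3) = some "x" ∧ PySem.List.pyGet? st (-4) = some "(" then
    match PySem.List.pop? st with
    | none => st
    | some (_s1, st1) =>
      match PySem.List.pop? st1 with
      | none => st1
      | some (s2, st2) =>
        match PySem.List.pop? st2 with
        | none => st2
        | some (s3, st3) =>
          match PySem.List.pop? st3 with
          | none => st3
          | some (_s4, st4) => (st4 ++ [s2]) ++ [s3]
  else st

def f (S : String) : List String :=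
  S.toList.foldl (fun stack c => fStep stack (String.ofList [c])) []

-- ===== PORT B =====
-- B-side helpers: bLoopS's termination proof (decreasing_by) cites replace_shrink, which needs
-- the characterisation of one full pass of str.replace as repAll; they must precede bLoopS.
def pvPat : List Char := ['(', 'x', 'x', ')']

-- what one full pass of S.replace("(xx)", "xx") produces (proved equal to PySem.Chars.replace below)
def repAll : List Char → List Char
  | '(' :: 'x' :: 'x' :: ')' :: t => 'x' :: 'x' :: repAll t
  | c :: t => c :: repAll t
  | [] => []

theorem repAll_cons_of_not_prefix {c : Char} {t : List Char} (hp : ¬ pvPat <+: (c :: t)) :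
    repAll (c :: t) = c :: repAll t := by
  refine repAll.eq_2 c t ?_
  intro t1 hc ht
  exact hp (by subst hc; subst ht; exact ⟨t1, rfl⟩)

theorem go_eq : ∀ (fuel : Nat) (l acc : List Char), l.length ≤ fuel →
    PySem.Chars.replace.go pvPat ['x','x'] fuel l acc = acc.reverse ++ repAll l := by
  intro fuel
  induction fuel with
  | zero =>
    intro l acc h
    have hl : l = [] := by cases l with | nil => rfl | cons a t => simp at h
    subst hl; simp [PySem.Chars.replace.go, repAll]
  | succ n ih =>
    intro l acc h
    match l with
    | [] => simp [PySem.Chars.replace.go, repAll]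
    | c :: t =>
      rw [PySem.Chars.replace.go]
      by_cases hp : pvPat.isPrefixOf (c :: t)
      · obtain ⟨r, hr⟩ := List.isPrefixOf_iff_prefix.mp hp
        simp only [hp, if_true]
        have hl : c :: t = '('::'x'::'x'::')'::r := by rw [← hr]; simp [pvPat]
        rw [hl] at h ⊢
        have hd : ('('::'x'::'x'::')'::r).drop pvPat.length = r := by simp [pvPat]
        rw [hd, ih r _ (by simp at h; omega)]
        simp [repAll]
      · simp only [hp]
        rw [if_neg (by simp)]
        rw [ih t _ (by simp at h; omega)]
        rw [repAll_cons_of_not_prefix (fun hpre => hp (List.isPrefixOf_iff_prefix.mpr hpre))]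
        simp

theorem replace_eq_repAll (l : List Char) :
    PySem.Chars.replace l pvPat ['x','x'] = repAll l := by
  rw [PySem.Chars.replace]
  simp [pvPat]
  exact go_eq l.length l [] (Nat.le_refl _)

theorem repAll_length_le : ∀ l : List Char, (repAll l).length ≤ l.length := by
  intro l
  induction l using repAll.induct with
  | case1 t ih => simp [repAll]; omega
  | case2 c t h ih => rw [repAll.eq_2 c t h]; simpa using ih
  | case3 => simp [repAll]

theorem repAll_length_lt : ∀ l : List Char, pvPat <:+: l → (repAll l).length < l.length := by
  intro l
  induction l using repAll.induct with
  | case1 t ih =>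
    have := repAll_length_le t
    simp [repAll]; omega
  | case2 c t h ih =>
    intro hinf
    rw [repAll.eq_2 c t h]
    rcases (List.infix_cons_iff).mp hinf with hpre | hinf'
    · exfalso
      obtain ⟨r, hr⟩ := hpre
      simp [pvPat] at hr
      exact h r hr.1.symm hr.2.symm
    · have := ih hinf'
      simpa using this
  | case3 => intro h; simp [pvPat] at h

theorem replace_shrink {S : String} (h : PySem.Str.isIn "(xx)" S = true) :
    (PySem.Str.replace S "(xx)" "xx").toList.length < S.toList.length := by
  rw [PySem.Str.toList_replace]
  have hpat : ("(xx)" : String).toList = pvPat := by decide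
  have hrep : ("xx" : String).toList = ['x','x'] := by decide
  rw [hpat, hrep, replace_eq_repAll]
  have hinf : pvPat <:+: S.toList := by
    rw [← hpat]; exact (PySem.Str.isIn_iff_infix _ _).mp h
  exact repAll_length_lt _ hinf

-- while "(xx)" in S: S = S.replace("(xx)", "xx")
def bLoopS (S : String) : String :=
  if h : PySem.Str.isIn "(xx)" S = true then bLoopS (PySem.Str.replace S "(xx)" "xx") else S
termination_by S.toList.length
decreasing_by exact replace_shrink h

-- return list(S)
def f_alt (S : String) : List String :=
  (bLoopS S).toList.map (fun c => String.ofList [c])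

-- ===== PRECONDITION & SPEC =====
def Spec_f (S : String) (out : List String) : Prop := out = f_alt S
instance (S : String) (out : List String) : Decidable (Spec_f S out) := by unfold Spec_f; infer_instance

-- ===== CLAIM (what is proved, stated in full; the proofs are below) =====
def Claim_equal_f : Prop := ∀ (S : String), Dom_f S → Spec_f S (f S)

-- ===== LEMMAS AND PROOFS =====

theorem pyGet?_neg {α : Type} (xs : List α) (k : Nat) (h1 : 1 ≤ k) (h2 : k ≤ xs.length) :
    PySem.List.pyGet? xs (-(k:Int)) = xs.reverse[k-1]? := by
  simp only [PySem.List.pyGet?, PySem.List.pyIdx?]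
  rw [if_neg (by omega), if_pos (by omega)]
  simp only [Option.bind_some, neg_neg, Int.toNat_natCast]
  rw [List.getElem?_reverse (by omega)]
  congr 1
  omega

theorem take3_decomp {α : Type} (xs : List α) (a b c : α)
    (h0 : xs[0]? = some a) (h1 : xs[1]? = some b) (h2 : xs[2]? = some c) :
    xs = [a, b, c] ++ xs.drop 3 := by
  match xs with
  | [] => simp at h0
  | [_] => simp at h1
  | [_, _] => simp at h2
  | x :: y :: z :: t => simp_all

-- fStep pushes when the pushed character cannot complete a "(", "x", "x", ")" top
theorem fStep_push (st : List String) (c : String)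
    (h : ¬ (c = ")" ∧ ∃ u, st = u ++ ["(", "x", "x"])) : fStep st c = st ++ [c] := by
  unfold fStep
  rw [if_neg]
  rintro ⟨hlen, h1, h2, h3, h4⟩
  simp only [List.length_append, List.length_cons, List.length_nil] at hlen
  have hlen' : ∀ k : Nat, k ≤ 4 → k ≤ (st ++ [c]).length := by
    intro k hk; simp only [List.length_append, List.length_cons, List.length_nil]; omega
  have m1 : (-1 : Int) = -((1:Nat):Int) := by norm_num
  have m2 : (-2 : Int) = -((2:Nat):Int) := by norm_num
  have m3 : (-3 : Int) = -((3:Nat):Int) := by norm_num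
  have m4 : (-4 : Int) = -((4:Nat):Int) := by norm_num
  rw [m1, pyGet?_neg _ 1 (by omega) (hlen' 1 (by omega))] at h1
  rw [m2, pyGet?_neg _ 2 (by omega) (hlen' 2 (by omega))] at h2
  rw [m3, pyGet?_neg _ 3 (by omega) (hlen' 3 (by omega))] at h3
  rw [m4, pyGet?_neg _ 4 (by omega) (hlen' 4 (by omega))] at h4
  norm_num [List.reverse_append] at h1 h2 h3 h4
  have hc : c = ")" := by simpa using h1
  have hdec := take3_decomp st.reverse "x" "x" "(" h2 h3 h4
  refine h ⟨hc, (st.reverse.drop 3).reverse, ?_⟩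
  have := congrArg List.reverse hdec
  simpa using this

-- fStep pops four and pushes back "x","x" when it does complete one
theorem fStep_reduce (u : List String) :
    fStep (u ++ ["(", "x", "x"]) ")" = u ++ ["x", "x"] := by
  unfold fStep
  rw [if_pos]
  · have p1 : PySem.List.pop? ((u ++ ["(", "x", "x"]) ++ [")"]) = some (")", u ++ ["(", "x", "x"]) :=
      PySem.List.pop?_last _ _
    rw [p1]; dsimp only
    have a3 : u ++ ["(", "x", "x"] = (u ++ ["(", "x"]) ++ ["x"] := by simp
    rw [a3, PySem.List.pop?_last]; dsimp only
    have a2 : u ++ ["(", "x"] = (u ++ ["("]) ++ ["x"] := by simp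
    rw [a2, PySem.List.pop?_last]; dsimp only
    rw [PySem.List.pop?_last]; dsimp only
    simp
  · have hlen' : ∀ k : Nat, k ≤ 4 → k ≤ ((u ++ ["(", "x", "x"]) ++ [")"]).length := by
      intro k hk; simp only [List.length_append, List.length_cons, List.length_nil]; omega
    have m1 : (-1 : Int) = -((1:Nat):Int) := by norm_num
    have m2 : (-2 : Int) = -((2:Nat):Int) := by norm_num
    have m3 : (-3 : Int) = -((3:Nat):Int) := by norm_num
    have m4 : (-4 : Int) = -((4:Nat):Int) := by norm_num
    refine ⟨by simp only [List.length_append, List.length_cons, List.length_nil]; omega, ?_, ?_, ?_, ?_⟩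
    · rw [m1, pyGet?_neg _ 1 (by omega) (hlen' 1 (by omega))]; norm_num [List.reverse_append]
    · rw [m2, pyGet?_neg _ 2 (by omega) (hlen' 2 (by omega))]; norm_num [List.reverse_append]
    · rw [m3, pyGet?_neg _ 3 (by omega) (hlen' 3 (by omega))]; norm_num [List.reverse_append]
    · rw [m4, pyGet?_neg _ 4 (by omega) (hlen' 4 (by omega))]; norm_num [List.reverse_append]

theorem ofList1_inj {a b : Char} (h : String.ofList [a] = String.ofList [b]) : a = b := by
  have := congrArg String.toList h; simpa using this

theorem push_of_ne (st : List String) (c : Char) (h : c ≠ ')') :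
    fStep st (String.ofList [c]) = st ++ [String.ofList [c]] := by
  refine fStep_push _ _ ?_
  rintro ⟨h1, -⟩
  exact h (by have := congrArg String.toList h1; simpa using this)

-- A's stack run is invariant under one full replace pass
theorem fold_repAll : ∀ l : List Char, ∀ st : List String,
    (repAll l).foldl (fun stack c => fStep stack (String.ofList [c])) st
      = l.foldl (fun stack c => fStep stack (String.ofList [c])) st := by
  intro l
  induction l using repAll.induct with
  | case1 t ih =>
    intro st
    rw [repAll.eq_1]
    simp only [List.foldl_cons]
    rw [push_of_ne st 'x' (by decide), push_of_ne _ 'x' (by decide)]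
    rw [push_of_ne st '(' (by decide), push_of_ne _ 'x' (by decide), push_of_ne _ 'x' (by decide)]
    have hx : String.ofList ['x'] = "x" := by decide
    have hp : String.ofList ['('] = "(" := by decide
    have hcl : String.ofList [')'] = ")" := by decide
    rw [hx, hp, hcl]
    have e : st ++ ["("] ++ ["x"] ++ ["x"] = st ++ ["(", "x", "x"] := by simp
    rw [e, fStep_reduce st]
    have e2 : st ++ ["x"] ++ ["x"] = st ++ ["x", "x"] := by simp
    rw [e2, ih]
  | case2 c t h ih =>
    intro st
    rw [repAll.eq_2 c t h]
    simp only [List.foldl_cons]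
    exact ih _
  | case3 => intro st; rfl

-- on a string with no occurrence of "(xx)" the stack run never reduces
theorem fold_normal : ∀ (l u : List Char), ¬ (pvPat <:+: (u ++ l)) →
    l.foldl (fun stack c => fStep stack (String.ofList [c])) (u.map (fun c => String.ofList [c]))
      = (u ++ l).map (fun c => String.ofList [c]) := by
  intro l
  induction l with
  | nil => intro u h; simp
  | cons c t ih =>
    intro u h
    simp only [List.foldl_cons]
    have hpush : fStep (u.map (fun c => String.ofList [c])) (String.ofList [c])
        = u.map (fun c => String.ofList [c]) ++ [String.ofList [c]] := by
      refine fStep_push _ _ ?_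
      rintro ⟨h1, w, hw⟩
      have hc : c = ')' := by have := congrArg String.toList h1; simpa using this
      have hw' : List.map (fun c => String.ofList [c]) u
          = w ++ List.map (fun c => String.ofList [c]) ['(', 'x', 'x'] := by
        rw [hw]; rfl
      obtain ⟨l₁, l₂, hu, -, hmap⟩ := List.map_eq_append_iff.mp hw'
      have hl₂ : l₂ = ['(', 'x', 'x'] := by
        have hlen := congrArg List.length hmap
        rcases l₂ with _ | ⟨a, _ | ⟨b, _ | ⟨d, _ | ⟨e, r⟩⟩⟩⟩ <;>
          simp only [List.map_cons, List.map_nil, List.length_cons, List.length_nil] at hlen hmap <;>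
          try omega
        obtain ⟨ha, hrest⟩ := List.cons_eq_cons.mp hmap
        obtain ⟨hb, hrest2⟩ := List.cons_eq_cons.mp hrest
        obtain ⟨hd, -⟩ := List.cons_eq_cons.mp hrest2
        rw [ofList1_inj ha, ofList1_inj hb, ofList1_inj hd]
      apply h
      refine ⟨l₁, t, ?_⟩
      rw [hu, hl₂, hc]
      simp [pvPat]
    rw [hpush]
    have e : (u.map (fun c => String.ofList [c])) ++ [String.ofList [c]]
        = (u ++ [c]).map (fun c => String.ofList [c]) := by simp
    rw [e, ih (u ++ [c]) (by simpa using h)]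
    simp

-- A's stack run is invariant under B's whole while-loop
theorem fold_bLoopS : ∀ (S : String) (st : List String),
    (bLoopS S).toList.foldl (fun stack c => fStep stack (String.ofList [c])) st
      = S.toList.foldl (fun stack c => fStep stack (String.ofList [c])) st := by
  intro S
  induction S using bLoopS.induct with
  | case1 S h ih =>
    intro st
    rw [bLoopS, dif_pos h, ih st]
    rw [PySem.Str.toList_replace]
    have hpat : ("(xx)" : String).toList = pvPat := by decide
    have hrep : ("xx" : String).toList = ['x','x'] := by decide
    rw [hpat, hrep, replace_eq_repAll, fold_repAll]
  | case2 S h => intro st; rw [bLoopS, dif_neg h]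

theorem bLoopS_no (S : String) : PySem.Str.isIn "(xx)" (bLoopS S) = false := by
  induction S using bLoopS.induct with
  | case1 S h ih => rw [bLoopS, dif_pos h]; exact ih
  | case2 S h => rw [bLoopS, dif_neg h]; simpa using h

-- ===== VERDICT (by name: the statement is the Claim_ definition above) =====
theorem f_spec : Claim_equal_f := by
  intro S _
  show f S = f_alt S
  unfold f f_alt
  rw [← fold_bLoopS S []]
  have hno : ¬ (pvPat <:+: (bLoopS S).toList) := by
    have h := bLoopS_no S
    have hpat : ("(xx)" : String).toList = pvPat := by decide
    rw [← hpat]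
    intro hin
    rw [(PySem.Str.isIn_iff_infix _ _).mpr hin] at h
    simp at h
  have h2 := fold_normal (bLoopS S).toList [] (by simpa using hno)
  simpa using h2
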